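-- pv_equiv track=rewrite | github.com/TheMagicSquid/sorting-everyday | 17th of April.py | create_sorted_lists
-- ===== SOURCE A (Python) =====
-- def create_sorted_lists(array):
--     sorted_array = []
--     unsorted_array = []
--     for i in array:
--         if len(sorted_array) == 0 or sorted_array[-1] < i:
--             sorted_array.append(i)
--         else:
--             unsorted_array.append(i)
--     list_of_sorted_list = [sorted_array]
--     if len(unsorted_array) > 0:
--         list_of_sorted_list.extend(create_sorted_lists(unsorted_array))
--     return list_of_sorted_list
-- ===== SOURCE B (Python) =====
-- def create_sorted_lists(array):
--     # Single pass: pile tails are kept nonincreasing, so a binary search finds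
--     # the first pile whose tail is < x (O(n log n) instead of A's repeated passes).
--     piles = []
--     tails = []
--     for x in array:
--         lo, hi = 0, len(tails)
--         while lo < hi:
--             mid = (lo + hi) // 2
--             if tails[mid] < x:
--                 hi = mid
--             else:
--                 lo = mid + 1
--         if lo == len(piles):
--             piles.append([x])
--             tails.append(x)
--         else:
--             piles[lo].append(x)
--             tails[lo] = x
--     return piles
-- ===== Notes on version B (the rewrite author's own statement) =====
-- stated objective: faster
-- what changed: Replaces A's recursive peel-one-pile-per-pass scheme by a single pass that assigns each element to the first accepting pile, located by binary search over the nonincreasing list of pile tails.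
-- intended difference: On the empty list A returns [[]] (a list containing one empty pile) while B returns [] (no piles), which is the intended partition of an empty array into increasing piles. — e.g. on create_sorted_lists([]): A returns [[]], B returns []
import Mathlib
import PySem

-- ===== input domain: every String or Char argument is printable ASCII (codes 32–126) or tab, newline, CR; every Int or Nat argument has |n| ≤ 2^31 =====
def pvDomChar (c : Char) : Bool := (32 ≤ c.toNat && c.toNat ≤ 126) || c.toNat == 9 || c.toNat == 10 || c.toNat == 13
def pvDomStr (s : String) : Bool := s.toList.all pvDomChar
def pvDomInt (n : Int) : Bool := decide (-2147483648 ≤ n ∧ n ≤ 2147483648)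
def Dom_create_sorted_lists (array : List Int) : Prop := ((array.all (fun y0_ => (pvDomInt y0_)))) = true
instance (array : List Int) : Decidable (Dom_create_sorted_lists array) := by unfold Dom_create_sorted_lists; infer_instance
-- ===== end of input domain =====

-- B replaces A's recursive peel-one-pile-per-pass scheme by a single pass that binary-searches
-- the nonincreasing pile tails for the first accepting pile (objective: faster).


-- ===== PORT A =====
-- A's loop splitting `array` into sorted_array / unsorted_array; the condition
-- `s.length = 0 ∨ s.getLastD 0 < x` is Python's `len(s) == 0 or s[-1] < i`
-- (getLastD is only reached when s ≠ [], where it equals s[-1] exactly).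
def pvSplitGo (s u : List Int) : List Int → List Int × List Int
  | [] => (s, u)
  | x :: xs =>
    if s.length = 0 ∨ s.getLastD 0 < x then pvSplitGo (s ++ [x]) u xs
    else pvSplitGo s (u ++ [x]) xs

-- termination helper for A's recursion (cited in decreasing_by)
theorem pvSplitGo_snd_len (xs : List Int) : ∀ (s u : List Int),
    ((pvSplitGo s u xs).2).length ≤ u.length + xs.length := by
  induction xs with
  | nil => intro s u; simp [pvSplitGo]
  | cons x xs ih =>
    intro s u
    simp only [pvSplitGo]
    split
    · have := ih (s ++ [x]) u
      simp only [List.length_cons]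
      omega
    · have := ih s (u ++ [x])
      simp only [List.length_append, List.length_cons, List.length_nil] at this ⊢
      omega

def create_sorted_lists (array : List Int) : List (List Int) :=
  if _h : 0 < (pvSplitGo [] [] array).2.length
  then (pvSplitGo [] [] array).1 :: create_sorted_lists (pvSplitGo [] [] array).2
  else [(pvSplitGo [] [] array).1]
termination_by array.length
decreasing_by
  cases array with
  | nil => simp [pvSplitGo] at _h
  | cons x xs =>
    have h1 : pvSplitGo [] [] (x :: xs) = pvSplitGo [x] [] xs := by
      simp [pvSplitGo]
    rw [h1]
    have := pvSplitGo_snd_len xs [x] []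
    simp only [List.length_nil, List.length_cons] at this ⊢
    omega

-- ===== PORT B =====
-- the while-loop binary search of Source B; tails[mid] is in range whenever hi ≤ tails.length,
-- where getD mid 0 is exact
def pvBisect (tails : List Int) (x : Int) (lo hi : Nat) : Nat :=
  if _h : lo < hi then
    if tails.getD ((lo + hi) / 2) 0 < x then pvBisect tails x lo ((lo + hi) / 2)
    else pvBisect tails x ((lo + hi) / 2 + 1) hi
  else lo
termination_by hi - lo
decreasing_by all_goals omega

-- one iteration of Source B's for-loop over (piles, tails)
def pvBStep (st : List (List Int) × List Int) (x : Int) : List (List Int) × List Int :=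
  let idx := pvBisect st.2 x 0 st.2.length
  if idx = st.1.length then (st.1 ++ [[x]], st.2 ++ [x])
  else (st.1.set idx (st.1.getD idx [] ++ [x]), st.2.set idx x)

def create_sorted_lists_alt (array : List Int) : List (List Int) :=
  (array.foldl pvBStep ([], [])).1

-- ===== PRECONDITION & SPEC =====
-- On the empty list A returns [[]] (one empty pile) while B returns [] (no piles),
-- which is the intended partition of an empty array into increasing piles.
def D_create_sorted_lists (array : List Int) : Prop := array = []
instance (array : List Int) : Decidable (D_create_sorted_lists array) := by
  unfold D_create_sorted_lists; infer_instance

def Spec_create_sorted_lists (array : List Int) (out : List (List Int)) : Prop :=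
  ¬ D_create_sorted_lists array → out = create_sorted_lists_alt array
instance (array : List Int) (out : List (List Int)) : Decidable (Spec_create_sorted_lists array out) := by
  unfold Spec_create_sorted_lists; infer_instance

def pvDiffWitness_create_sorted_lists : List Int := []
def pvDiffWitnessOut_create_sorted_lists : (List (List Int)) × (List (List Int)) := ([[]], [])

-- ===== CLAIM (what is proved, stated in full; the proofs are below) =====
def Claim_unchanged_create_sorted_lists : Prop :=
  ∀ (array : List Int), Dom_create_sorted_lists array →
    Spec_create_sorted_lists array (create_sorted_lists array)
def Claim_changed_create_sorted_lists : Prop :=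
  Dom_create_sorted_lists (pvDiffWitness_create_sorted_lists) ∧
  D_create_sorted_lists (pvDiffWitness_create_sorted_lists) ∧
  create_sorted_lists (pvDiffWitness_create_sorted_lists) = pvDiffWitnessOut_create_sorted_lists.1 ∧
  create_sorted_lists_alt (pvDiffWitness_create_sorted_lists) = pvDiffWitnessOut_create_sorted_lists.2 ∧
  pvDiffWitnessOut_create_sorted_lists.1 ≠ pvDiffWitnessOut_create_sorted_lists.2
def Claim_exact_create_sorted_lists : Prop :=
  ∀ (array : List Int), Dom_create_sorted_lists array → D_create_sorted_lists array →
    create_sorted_lists array ≠ create_sorted_lists_alt array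

-- ===== LEMMAS AND PROOFS =====

-- first-fit reference step: x joins the first pile whose tail is < x
def ffStep : List (List Int) → Int → List (List Int)
  | [], x => [[x]]
  | p :: ps, x => if p.getLastD 0 < x then (p ++ [x]) :: ps else p :: ffStep ps x

-- split of xs against a running tail t: elements accepted by the greedy increasing pass / rejected
def pvSw (t : Int) : List Int → List Int × List Int
  | [] => ([], [])
  | x :: xs => if t < x then (x :: (pvSw x xs).1, (pvSw x xs).2)
               else ((pvSw t xs).1, x :: (pvSw t xs).2)

-- index of the first tail < x (or length)
def ffIdx : List Int → Int → Nat
  | [], _ => 0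
  | t :: ts, x => if t < x then 0 else ffIdx ts x + 1

theorem pvSw_snd_len (xs : List Int) : ∀ t, ((pvSw t xs).2).length ≤ xs.length := by
  induction xs with
  | nil => intro t; simp [pvSw]
  | cons x xs ih =>
    intro t
    simp only [pvSw]
    split
    · have := ih x; simpa using Nat.le_succ_of_le this
    · have := ih t; simpa using Nat.succ_le_succ this

theorem foldl_ffStep_cons (xs : List Int) : ∀ (s : List Int) (ps : List (List Int)), s ≠ [] →
    List.foldl ffStep (s :: ps) xs
      = (s ++ (pvSw (s.getLastD 0) xs).1) :: List.foldl ffStep ps (pvSw (s.getLastD 0) xs).2 := by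
  induction xs with
  | nil => intro s ps _; simp [pvSw]
  | cons x xs ih =>
    intro s ps hs
    simp only [List.foldl_cons, pvSw]
    by_cases hlt : s.getLastD 0 < x
    · rw [if_pos hlt]
      have hstep : ffStep (s :: ps) x = (s ++ [x]) :: ps := by
        simp only [ffStep]; rw [if_pos hlt]
      rw [hstep, ih (s ++ [x]) ps (by simp), List.getLastD_concat]
      simp [List.append_assoc]
    · rw [if_neg hlt]
      have hstep : ffStep (s :: ps) x = s :: ffStep ps x := by
        simp only [ffStep]; rw [if_neg hlt]
      rw [hstep, ih s (ffStep ps x) hs]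
      simp only [List.foldl_cons]

theorem pvSplitGo_eq (xs : List Int) : ∀ (s u : List Int), s ≠ [] →
    pvSplitGo s u xs = (s ++ (pvSw (s.getLastD 0) xs).1, u ++ (pvSw (s.getLastD 0) xs).2) := by
  induction xs with
  | nil => intro s u _; simp [pvSplitGo, pvSw]
  | cons x xs ih =>
    intro s u hs
    have hlen : ¬ s.length = 0 := by simpa using hs
    simp only [pvSplitGo, pvSw]
    by_cases hlt : s.getLastD 0 < x
    · rw [if_pos (Or.inr hlt), if_pos hlt, ih (s ++ [x]) u (by simp), List.getLastD_concat]
      simp [List.append_assoc]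
    · rw [if_neg (by tauto), if_neg hlt, ih s (u ++ [x]) hs]
      simp [List.append_assoc]

theorem A_eq_lin : ∀ (n : Nat) (xs : List Int), xs.length ≤ n → xs ≠ [] →
    create_sorted_lists xs = List.foldl ffStep [] xs := by
  intro n
  induction n with
  | zero =>
    intro xs h hne
    cases xs with
    | nil => exact absurd rfl hne
    | cons x xs => simp at h
  | succ n ih =>
    intro xs h hne
    cases xs with
    | nil => exact absurd rfl hne
    | cons x rest =>
      have hsg : pvSplitGo [] [] (x :: rest)
          = (x :: (pvSw x rest).1, (pvSw x rest).2) := by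
        have h1 : pvSplitGo [] [] (x :: rest) = pvSplitGo [x] [] rest := by
          simp [pvSplitGo]
        rw [h1, pvSplitGo_eq rest [x] [] (by simp)]
        simp
      have hfold : List.foldl ffStep [] (x :: rest)
          = (x :: (pvSw x rest).1) :: List.foldl ffStep [] (pvSw x rest).2 := by
        have h2 : ffStep [] x = [[x]] := rfl
        rw [List.foldl_cons, h2, foldl_ffStep_cons rest [x] [] (by simp)]
        simp
      rw [create_sorted_lists, hsg, hfold]
      by_cases hb : (pvSw x rest).2 = []
      · simp [hb]
      · have hlen : ((pvSw x rest).2).length ≤ n := by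
          have := pvSw_snd_len rest x
          simp only [List.length_cons] at h
          omega
        rw [dif_pos (by simpa using List.length_pos_iff.mpr hb)]
        rw [ih _ hlen hb]

-- ===== B-side lemmas =====

theorem pairwise_ge_getD {l : List Int} (hp : l.Pairwise (· ≥ ·)) {i j : Nat}
    (hij : i ≤ j) (hj : j < l.length) : l.getD j 0 ≤ l.getD i 0 := by
  rcases Nat.lt_or_ge i j with hlt | hge
  · have := List.pairwise_iff_getElem.mp hp i j (Nat.lt_trans hlt hj) hj hlt
    rw [List.getD_eq_getElem l 0 hj, List.getD_eq_getElem l 0 (Nat.lt_trans hlt hj)]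
    exact this
  · have : i = j := Nat.le_antisymm hij hge
    subst this; exact le_refl _

theorem ffIdx_le_length (ts : List Int) (x : Int) : ffIdx ts x ≤ ts.length := by
  induction ts with
  | nil => simp [ffIdx]
  | cons t ts ih =>
    simp only [ffIdx, List.length_cons]
    split
    · omega
    · omega

theorem ffIdx_not_lt (ts : List Int) (x : Int) : ∀ i, i < ffIdx ts x → ¬ ts.getD i 0 < x := by
  induction ts with
  | nil => intro i h; simp [ffIdx] at h
  | cons t ts ih =>
    intro i h
    simp only [ffIdx] at h
    by_cases ht : t < x
    · simp [ht] at h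
    · rw [if_neg ht] at h
      cases i with
      | zero => simpa using ht
      | succ k => simpa using ih k (by omega)

theorem ffIdx_lt (ts : List Int) (x : Int) (h : ffIdx ts x < ts.length) :
    ts.getD (ffIdx ts x) 0 < x := by
  induction ts with
  | nil => simp [ffIdx] at h
  | cons t ts ih =>
    simp only [ffIdx] at h ⊢
    by_cases ht : t < x
    · simpa [ht] using ht
    · rw [if_neg ht] at h ⊢
      simp only [List.length_cons] at h
      simpa using ih (by omega)

theorem pvBisect_eq (ts : List Int) (x : Int) (hp : ts.Pairwise (· ≥ ·)) :
    ∀ (k lo hi : Nat), hi - lo ≤ k → lo ≤ ffIdx ts x → ffIdx ts x ≤ hi → hi ≤ ts.length →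
      pvBisect ts x lo hi = ffIdx ts x := by
  intro k
  induction k with
  | zero =>
    intro lo hi hk h1 h2 _
    rw [pvBisect, dif_neg (by omega)]
    omega
  | succ k ih =>
    intro lo hi hk h1 h2 hlen
    rw [pvBisect]
    by_cases hlh : lo < hi
    · rw [dif_pos hlh]
      by_cases hm : ts.getD ((lo + hi) / 2) 0 < x
      · rw [if_pos hm]
        have hle : ffIdx ts x ≤ (lo + hi) / 2 := by
          by_contra hcon
          exact (ffIdx_not_lt ts x _ (by omega)) hm
        exact ih lo ((lo + hi) / 2) (by omega) h1 hle (by omega)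
      · rw [if_neg hm]
        have hgt : (lo + hi) / 2 < ffIdx ts x := by
          by_contra hcon
          push_neg at hcon
          have hmlt : (lo + hi) / 2 < ts.length := by omega
          have hfl : ffIdx ts x < ts.length := by omega
          have h3 := ffIdx_lt ts x hfl
          have h4 := pairwise_ge_getD hp hcon hmlt
          exact hm (lt_of_le_of_lt h4 h3)
        exact ih ((lo + hi) / 2 + 1) hi (by omega) (by omega) h2 hlen
    · rw [dif_neg hlh]
      omega

def InvB (st : List (List Int) × List Int) : Prop :=
  st.2 = st.1.map (fun p => p.getLastD 0) ∧ (∀ p ∈ st.1, p ≠ []) ∧ st.2.Pairwise (· ≥ ·)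

theorem ffStep_char (x : Int) : ∀ (piles : List (List Int)),
    ffStep piles x =
      (if ffIdx (piles.map (fun p => p.getLastD 0)) x = piles.length
       then piles ++ [[x]]
       else piles.set (ffIdx (piles.map (fun p => p.getLastD 0)) x)
              (piles.getD (ffIdx (piles.map (fun p => p.getLastD 0)) x) [] ++ [x])) := by
  intro piles
  induction piles with
  | nil => simp [ffStep, ffIdx]
  | cons p ps ih =>
    simp only [ffStep, List.map_cons, ffIdx, List.length_cons]
    by_cases h : p.getLastD 0 < x
    · rw [List.getLastD_eq_getLast?] at h
      simp [h]
    · rw [if_neg h, if_neg h, ih]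
      by_cases he : ffIdx (ps.map (fun p => p.getLastD 0)) x = ps.length
      · rw [if_pos he, if_pos (by omega)]
        simp
      · rw [if_neg he, if_neg (by omega)]
        simp

theorem pvBStep_spec (st : List (List Int) × List Int) (x : Int) (hInv : InvB st) :
    (pvBStep st x).1 = ffStep st.1 x ∧ InvB (pvBStep st x) := by
  obtain ⟨h2, hne, hp⟩ := hInv
  have hlen2 : st.2.length = st.1.length := by rw [h2]; simp
  have hbis : pvBisect st.2 x 0 st.2.length = ffIdx st.2 x :=
    pvBisect_eq st.2 x hp st.2.length 0 st.2.length (by omega) (by omega)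
      (ffIdx_le_length st.2 x) (by omega)
  have hidx := ffIdx_le_length st.2 x
  simp only [pvBStep, hbis]
  by_cases heq : ffIdx st.2 x = st.1.length
  · rw [if_pos heq]
    refine ⟨?_, ?_, ?_, ?_⟩
    · rw [ffStep_char, ← h2, if_pos heq]
    · simp [h2]
    · intro p hpm
      rcases List.mem_append.mp hpm with hm | hm
      · exact hne p hm
      · simp at hm; subst hm; simp
    · rw [List.pairwise_append]
      refine ⟨hp, by simp, ?_⟩
      intro a ha b hb
      rw [List.mem_singleton] at hb
      rw [hb]
      obtain ⟨i, hi, hae⟩ := List.mem_iff_getElem.mp ha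
      have := ffIdx_not_lt st.2 x i (by omega)
      rw [List.getD_eq_getElem st.2 0 hi, hae] at this
      omega
  · rw [if_neg heq]
    have hlt : ffIdx st.2 x < st.2.length := by omega
    refine ⟨?_, ?_, ?_, ?_⟩
    · rw [ffStep_char, ← h2, if_neg heq]
    · rw [h2, List.map_set]
      simp
    · intro p hpm
      rcases List.mem_or_eq_of_mem_set hpm with hm | hm
      · exact hne p hm
      · subst hm; simp
    · rw [List.pairwise_iff_getElem]
      intro i j hi hj hij
      simp only [List.length_set] at hi hj
      rw [List.getElem_set, List.getElem_set]
      have hmono := List.pairwise_iff_getElem.mp hp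
      by_cases hji : ffIdx st.2 x = j
      · subst hji
        rw [if_neg (by omega), if_pos rfl]
        have := ffIdx_not_lt st.2 x i hij
        rw [List.getD_eq_getElem st.2 0 hi] at this
        omega
      · rw [if_neg hji]
        by_cases hii : ffIdx st.2 x = i
        · subst hii
          rw [if_pos rfl]
          have h3 := ffIdx_lt st.2 x hlt
          have h4 := hmono (ffIdx st.2 x) j hi hj hij
          rw [List.getD_eq_getElem st.2 0 hi] at h3
          omega
        · rw [if_neg hii]
          exact hmono i j hi hj hij

theorem foldl_pvBStep_eq (xs : List Int) : ∀ (st : List (List Int) × List Int), InvB st →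
    (List.foldl pvBStep st xs).1 = List.foldl ffStep st.1 xs := by
  induction xs with
  | nil => intro st _; simp
  | cons x xs ih =>
    intro st hInv
    obtain ⟨h1, h2⟩ := pvBStep_spec st x hInv
    rw [List.foldl_cons, List.foldl_cons, ih (pvBStep st x) h2, h1]

theorem alt_eq_lin (xs : List Int) :
    create_sorted_lists_alt xs = List.foldl ffStep [] xs := by
  unfold create_sorted_lists_alt
  exact foldl_pvBStep_eq xs ([], []) ⟨rfl, by simp, by simp⟩

-- ===== VERDICT (by name: the statement is the Claim_ definition above) =====
theorem create_sorted_lists_spec : Claim_unchanged_create_sorted_lists := by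
  unfold Claim_unchanged_create_sorted_lists Spec_create_sorted_lists D_create_sorted_lists
  intro array _ hne
  rw [A_eq_lin array.length array (le_refl _) hne, alt_eq_lin]

theorem create_sorted_lists_changed : Claim_changed_create_sorted_lists := by
  unfold Claim_changed_create_sorted_lists
  refine ⟨by decide, rfl, ?_, rfl, by decide⟩
  rw [create_sorted_lists]
  simp [pvSplitGo, pvDiffWitness_create_sorted_lists, pvDiffWitnessOut_create_sorted_lists]

theorem create_sorted_lists_tight : Claim_exact_create_sorted_lists := by
  unfold Claim_exact_create_sorted_lists D_create_sorted_lists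
  intro array _ hd
  subst hd
  have hA : create_sorted_lists [] = [[]] := by
    rw [create_sorted_lists]; simp [pvSplitGo]
  rw [hA]
  simp [create_sorted_lists_alt]
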